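-- pv_equiv track=rewrite | github.com/xzong0619/boltz-hackathon | scripts/generate_local_msa.py | _extract_sequence
-- ===== SOURCE A (Python) =====
-- def _extract_sequence(line: str, range_tuple: tuple[int, int]) -> str:
--     """Extract sequence for specific range."""
--     seq = []
--     no_insert_count = 0
--     start, end = range_tuple
--
--     for char in line:
--         if char.isupper() or char == "-":
--             no_insert_count += 1
--         # we keep insertions
--         if start < no_insert_count <= end:
--             seq.append(char)
--         elif no_insert_count > end:
--             break
--
--     return "".join(seq)
-- ===== SOURCE B (Python) =====
-- def _extract_sequence(line: str, range_tuple: tuple[int, int]) -> str: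
--     """Extract sequence for specific range.
--
--     The no-insert count is monotone, so the kept characters form one
--     contiguous slice of the line: find its boundary indices, then slice.
--     """
--     start, end = range_tuple
--     count = 0
--     first = None
--     stop = len(line)
--     for i, ch in enumerate(line):
--         if ch.isupper() or ch == "-":
--             count += 1
--         if first is None and count > start:
--             first = i
--         if count > end:
--             stop = i
--             break
--     if first is None:
--         return ""
--     return line[first:stop]
-- ===== Notes on version B (the rewrite author's own statement) =====
-- stated objective: alternative
-- what changed: Instead of accumulating kept characters in a list with append+join, B exploits that the no-insert count is monotone (so the kept region is contiguous): one pass records only the first index where the count exceeds start and the index where it exceeds end, then returns the slice line[first:stop].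
import Mathlib
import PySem

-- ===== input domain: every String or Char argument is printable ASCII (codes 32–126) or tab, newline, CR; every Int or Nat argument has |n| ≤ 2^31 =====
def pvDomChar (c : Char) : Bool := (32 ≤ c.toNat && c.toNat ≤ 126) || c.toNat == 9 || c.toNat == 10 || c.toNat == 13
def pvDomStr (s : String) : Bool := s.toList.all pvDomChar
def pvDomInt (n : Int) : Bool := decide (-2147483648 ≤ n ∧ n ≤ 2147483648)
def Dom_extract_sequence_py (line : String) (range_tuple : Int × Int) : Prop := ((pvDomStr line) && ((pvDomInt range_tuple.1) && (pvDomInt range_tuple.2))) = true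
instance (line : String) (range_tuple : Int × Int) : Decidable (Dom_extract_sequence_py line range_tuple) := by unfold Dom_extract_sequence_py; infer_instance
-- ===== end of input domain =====

-- B computes the boundary indices of the (contiguous) kept region in one pass and
-- returns a slice, instead of accumulating kept characters in a list; objective: alternative.

-- the shared count update: `if char.isupper() or char == "-": no_insert_count += 1`
def pvBump (c : Char) (cnt : Int) : Int :=
  if PySem.Chars.isupper c || c == '-' then cnt + 1 else cnt

-- ===== PORT A =====
-- the for-loop of A with early break: state = accumulated chars, running no_insert_count
def pvGoA (s e : Int) : List Char → Int → List Char
  | [], _ => []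
  | c :: rest, cnt =>
    let cnt' := pvBump c cnt
    if s < cnt' ∧ cnt' ≤ e then c :: pvGoA s e rest cnt'
    else if e < cnt' then []
    else pvGoA s e rest cnt'

def extract_sequence_py (line : String) (range_tuple : Int × Int) : String :=
  String.mk (pvGoA range_tuple.1 range_tuple.2 line.toList 0)

-- ===== PORT B =====
-- B's loop: enumerate with index i, track count and `first` (none until count > start);
-- on break return stop = i, otherwise stop = len(line) (= the final value of i).
def pvGoB (s e : Int) : List Char → Nat → Int → Option Nat → (Option Nat × Nat)
  | [], i, _, first => (first, i)
  | c :: rest, i, cnt, first =>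
    let cnt' := pvBump c cnt
    let first' := if first.isNone && decide (s < cnt') then some i else first
    if e < cnt' then (first', i)
    else pvGoB s e rest (i + 1) cnt' first'

def extract_sequence_py_alt (line : String) (range_tuple : Int × Int) : String :=
  let r := pvGoB range_tuple.1 range_tuple.2 line.toList 0 0 none
  match r.1 with
  | none => ""
  | some f => String.mk (PySem.List.slice line.toList (some (f : Int)) (some (r.2 : Int)))

-- ===== PRECONDITION & SPEC =====
def Spec_extract_sequence_py (line : String) (range_tuple : Int × Int) (out : String) : Prop := out = extract_sequence_py_alt line range_tuple
instance (line : String) (range_tuple : Int × Int) (out : String) : Decidable (Spec_extract_sequence_py line range_tuple out) := by unfold Spec_extract_sequence_py; infer_instance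

-- ===== CLAIM (what is proved, stated in full; the proofs are below) =====
def Claim_equal_extract_sequence_py : Prop := ∀ (line : String) (range_tuple : Int × Int), Dom_extract_sequence_py line range_tuple → Spec_extract_sequence_py line range_tuple (extract_sequence_py line range_tuple)

-- ===== LEMMAS AND PROOFS =====

theorem pvBump_ge (c : Char) (cnt : Int) : cnt ≤ pvBump c cnt := by
  unfold pvBump; split <;> omega

-- index of the first char after which the running count exceeds s (= length if never)
def pvFirstIdx (s : Int) : List Char → Int → Nat
  | [], _ => 0
  | c :: rest, cnt =>
    if s < pvBump c cnt then 0 else 1 + pvFirstIdx s rest (pvBump c cnt)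

theorem pvFirstIdx_pos (s : Int) (l : List Char) (cnt : Int) (h : s < cnt) :
    pvFirstIdx s l cnt = 0 := by
  cases l with
  | nil => rfl
  | cons c rest =>
    have hb := pvBump_ge c cnt
    simp only [pvFirstIdx]
    rw [if_pos (by omega)]

theorem pvFirstIdx_le_length (e : Int) (l : List Char) (cnt : Int) :
    pvFirstIdx e l cnt ≤ l.length := by
  induction l generalizing cnt with
  | nil => simp [pvFirstIdx]
  | cons c rest ih =>
    simp only [pvFirstIdx, List.length_cons]
    have := ih (pvBump c cnt)
    split <;> omega

theorem pvGoA_eq (s e : Int) (l : List Char) (cnt : Int) :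
    pvGoA s e l cnt = (l.take (pvFirstIdx e l cnt)).drop (pvFirstIdx s l cnt) := by
  induction l generalizing cnt with
  | nil => simp [pvGoA, pvFirstIdx]
  | cons c rest ih =>
    simp only [pvGoA, pvFirstIdx]
    by_cases he : e < pvBump c cnt
    · simp only [if_pos he, if_neg (show ¬ (s < pvBump c cnt ∧ pvBump c cnt ≤ e) by omega)]
      simp
    · by_cases hs : s < pvBump c cnt
      · simp only [if_neg he, if_pos hs,
          if_pos (show s < pvBump c cnt ∧ pvBump c cnt ≤ e from ⟨hs, by omega⟩)]
        rw [Nat.add_comm 1, List.take_succ_cons, List.drop_zero, ih,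
          pvFirstIdx_pos s rest _ hs, List.drop_zero]
      · simp only [if_neg he, if_neg hs,
          if_neg (show ¬ (s < pvBump c cnt ∧ pvBump c cnt ≤ e) by omega)]
        rw [Nat.add_comm 1 (pvFirstIdx e rest _), Nat.add_comm 1 (pvFirstIdx s rest _),
          List.take_succ_cons, List.drop_succ_cons, ih]

theorem pvGoB_some (s e : Int) (l : List Char) (i : Nat) (cnt : Int) (j : Nat) :
    pvGoB s e l i cnt (some j) = (some j, i + pvFirstIdx e l cnt) := by
  induction l generalizing i cnt with
  | nil => simp [pvGoB, pvFirstIdx]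
  | cons c rest ih =>
    simp only [pvGoB, pvFirstIdx, Option.isNone_some, Bool.false_and]
    rw [show (if (false = true) then some i else some j) = some j from by simp]
    by_cases he : e < pvBump c cnt
    · simp [if_pos he]
    · simp only [if_neg he, ih]
      simp only [Prod.mk.injEq]
      refine ⟨by trivial, by omega⟩

theorem pvGoB_none (s e : Int) (l : List Char) (i : Nat) (cnt : Int) :
    pvGoB s e l i cnt none =
      ((if pvFirstIdx s l cnt ≤ pvFirstIdx e l cnt ∧ pvFirstIdx s l cnt < l.length
          then some (i + pvFirstIdx s l cnt) else none),
        i + pvFirstIdx e l cnt) := by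
  induction l generalizing i cnt with
  | nil => simp [pvGoB, pvFirstIdx]
  | cons c rest ih =>
    simp only [pvGoB, pvFirstIdx, Option.isNone_none, Bool.true_and, decide_eq_true_eq,
      List.length_cons]
    by_cases hs : s < pvBump c cnt
    · simp only [if_pos hs]
      by_cases he : e < pvBump c cnt
      · simp only [if_pos he]
        simp
      · simp only [if_neg he, pvGoB_some]
        rw [if_pos (show (0:Nat) ≤ 1 + pvFirstIdx e rest (pvBump c cnt) ∧ 0 < rest.length + 1
          by omega)]
        simp only [Prod.mk.injEq]
        refine ⟨by trivial, by omega⟩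
    · simp only [if_neg hs]
      by_cases he : e < pvBump c cnt
      · simp only [if_pos he]
        rw [if_neg (by omega)]
        simp
      · simp only [if_neg he, ih]
        by_cases hcond : pvFirstIdx s rest (pvBump c cnt) ≤ pvFirstIdx e rest (pvBump c cnt) ∧
            pvFirstIdx s rest (pvBump c cnt) < rest.length
        · rw [if_pos hcond, if_pos (by omega)]
          simp only [Prod.mk.injEq, Option.some.injEq]
          constructor <;> omega
        · rw [if_neg hcond, if_neg (by omega)]
          simp only [Prod.mk.injEq]
          refine ⟨by trivial, by omega⟩

-- ===== VERDICT (by name: the statement is the Claim_ definition above) =====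
theorem extract_sequence_py_spec : Claim_equal_extract_sequence_py := by
  intro line rt _
  unfold Spec_extract_sequence_py extract_sequence_py extract_sequence_py_alt
  rw [pvGoB_none, pvGoA_eq]
  set l := line.toList
  set f := pvFirstIdx rt.1 l 0
  set t := pvFirstIdx rt.2 l 0
  by_cases hcond : f ≤ t ∧ f < l.length
  · simp only [if_pos hcond, Nat.zero_add]
    rw [PySem.List.slice_natCast]
    congr 1
    rw [List.drop_take]
  · simp only [if_neg hcond]
    have hlen : (l.take t).length ≤ f := by
      have ht := pvFirstIdx_le_length rt.2 l 0
      simp only [List.length_take]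
      omega
    rw [List.drop_eq_nil_of_le hlen]
    rfl
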